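-- pv_equiv track=rewrite | github.com/facebookresearch/Mephisto | mephisto/generators/form_composer/config_validation/token_sets_values_config.py | _premutate_single_tokents
-- ===== SOURCE A (Python) =====
-- import itertools
-- from typing import Dict
-- from typing import List
--
-- TokensPermutationType = List[
--     Dict[
--         str, Dict[
--             str, List[str]
--         ]
--     ]
-- ]
--
-- def _premutate_single_tokents(data: Dict[str, List[str]]) -> TokensPermutationType:
--     all_permutations = []
--     # Make a list to iterate many times
--     data_keys = list(data.keys())
--
--     # Collect a list of values lists in data keys order
--     sorted_values_lists: List[list] = [values for token, values in data.items()]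
--
--     # Making a list of premutated dicts
--     for i, row in enumerate(itertools.product(*sorted_values_lists, repeat=1)):
--         single_permudation = {}
--         for y, key in enumerate(data_keys):
--             single_permudation[key] = row[y]
--
--         all_permutations.append(
--             {
--                 "tokens_values": single_permudation,
--             }
--         )
--
--     return all_permutations
-- ===== SOURCE B (Python) =====
-- def _premutate_single_tokents(data):
--     partials = [{}]
--     for key, values in data.items():
--         partials = [{**partial, key: value} for partial in partials for value in values]
--     return [{"tokens_values": partial} for partial in partials]
-- ===== Notes on version B (the rewrite author's own statement) =====
-- stated objective: simpler
-- what changed: Replaces itertools.product over index-tuples plus positional re-zipping with data keys by a left fold that grows a list of partial dicts, extending each partial with every value of the current key; same O(product size) cost.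
import Mathlib
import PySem

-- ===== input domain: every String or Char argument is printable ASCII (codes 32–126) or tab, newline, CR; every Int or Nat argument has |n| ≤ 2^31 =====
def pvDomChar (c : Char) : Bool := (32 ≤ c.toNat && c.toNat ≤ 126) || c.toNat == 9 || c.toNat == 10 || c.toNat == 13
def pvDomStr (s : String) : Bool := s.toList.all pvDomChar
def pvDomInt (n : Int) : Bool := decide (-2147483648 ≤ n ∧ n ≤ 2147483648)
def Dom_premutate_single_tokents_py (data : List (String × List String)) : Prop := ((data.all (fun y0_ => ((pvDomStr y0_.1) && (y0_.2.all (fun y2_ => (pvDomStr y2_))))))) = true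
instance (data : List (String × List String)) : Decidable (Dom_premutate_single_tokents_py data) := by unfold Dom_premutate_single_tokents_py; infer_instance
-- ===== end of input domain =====

-- B replaces itertools.product + positional re-zipping by a left fold growing partial dicts (different decomposition, same cost).

-- ===== PORT A =====
-- itertools.product(*lists) over lists of strings, first factor varying slowest
def pyProductStr : List (List String) → List (List String)
  | [] => [[]]
  | l :: ls => l.flatMap (fun x => (pyProductStr ls).map (fun r => x :: r))

def premutate_single_tokents_py (data : List (String × List String)) : List (List (String × List (String × String))) :=
  let data_keys := data.map Prod.fst
  let sorted_values_lists := data.map Prod.snd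
  (PySem.List.enumerate (pyProductStr sorted_values_lists)).foldl
    (fun all_permutations irow =>
      let single_permudation : PySem.Dict String String :=
        (PySem.List.enumerate data_keys).foldl
          (fun d yk => d.insert yk.2 ((PySem.List.pyGet? irow.2 yk.1).getD "")) PySem.Dict.empty
      all_permutations ++ [[("tokens_values", single_permudation.items)]]) []

-- ===== PORT B =====
def premutate_single_tokents_py_alt (data : List (String × List String)) : List (List (String × List (String × String))) :=
  let partials : List (PySem.Dict String String) :=
    data.foldl
      (fun partials kv => partials.flatMap (fun p => kv.2.map (fun v => p.insert kv.1 v)))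
      [PySem.Dict.empty]
  partials.map (fun p => [("tokens_values", p.items)])

-- ===== PRECONDITION & SPEC =====
-- Pre_ excludes association lists with duplicate keys: a Python dict cannot hold them
-- (duplicates would already be collapsed before either function is called), so such lists
-- do not represent a dict input at all.
def Pre_premutate_single_tokents_py (data : List (String × List String)) : Prop :=
  (data.map Prod.fst).Nodup
instance (data : List (String × List String)) : Decidable (Pre_premutate_single_tokents_py data) := by
  unfold Pre_premutate_single_tokents_py; infer_instance

def pvWitness_premutate_single_tokents_py : (List (String × List String)) :=
  [("a", ["1", "2"]), ("b", ["x"])]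

def Spec_premutate_single_tokents_py (data : List (String × List String)) (out : List (List (String × List (String × String)))) : Prop := out = premutate_single_tokents_py_alt data
instance (data : List (String × List String)) (out : List (List (String × List (String × String)))) : Decidable (Spec_premutate_single_tokents_py data out) := by unfold Spec_premutate_single_tokents_py; infer_instance

-- ===== CLAIM (what is proved, stated in full; the proofs are below) =====
def Claim_equal_premutate_single_tokents_py : Prop := ∀ (data : List (String × List String)), Dom_premutate_single_tokents_py data → Pre_premutate_single_tokents_py data → Spec_premutate_single_tokents_py data (premutate_single_tokents_py data)

-- ===== LEMMAS AND PROOFS =====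

-- every row of the product has one entry per factor
theorem pyProductStr_length {ls : List (List String)} {row : List String}
    (h : row ∈ pyProductStr ls) : row.length = ls.length := by
  induction ls generalizing row with
  | nil => simp [pyProductStr] at h; simp [h]
  | cons l ls ih =>
    simp [pyProductStr] at h
    obtain ⟨x, _, r, hr, rfl⟩ := h
    simp [ih hr]

-- A's inner loop builds, item-wise, the positional zip of keys with the row
theorem innerA_items (keys row : List String) (hlen : row.length = keys.length)
    (hnd : keys.Nodup) :
    ((PySem.List.enumerate keys).foldl
      (fun (d : PySem.Dict String String) yk =>
        d.insert yk.2 ((PySem.List.pyGet? row yk.1).getD "")) PySem.Dict.empty).items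
      = keys.zip row := by
  refine Eq.trans (PySem.Dict.items_foldl_insert_fresh (PySem.List.enumerate keys)
      (fun yk => yk.2) (fun yk => (PySem.List.pyGet? row yk.1).getD "") PySem.Dict.empty
      (fun a _ => rfl)
      (by simpa [PySem.List.map_snd_enumerate] using hnd)) ?_
  show [] ++ _ = _
  rw [List.nil_append]
  apply List.ext_getElem
  · simp [PySem.List.length_enumerate, hlen]
  · intro i h1 h2
    have hi : i < keys.length := by simpa [PySem.List.length_enumerate] using h1
    simp [PySem.List.getElem_enumerate, PySem.List.pyGet?_natCast,
      List.getElem?_eq_getElem (by omega : i < row.length)]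

-- B's fold, generalized over the current list of partial dicts
theorem foldB_eq (data : List (String × List String)) (P : List (PySem.Dict String String))
    (hnd : (data.map Prod.fst).Nodup)
    (hP : ∀ p ∈ P, p.keys.Nodup ∧ ∀ a ∈ data.map Prod.fst, p.contains a = false) :
    data.foldl
      (fun partials kv => partials.flatMap (fun p => kv.2.map (fun v => p.insert kv.1 v)))
      P
    = P.flatMap (fun p => (pyProductStr (data.map Prod.snd)).map
        (fun row => PySem.Dict.mk (p.items ++ (data.map Prod.fst).zip row))) := by
  induction data generalizing P with
  | nil =>
    simp only [List.foldl_nil, List.map_nil, pyProductStr, List.zip_nil_left,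
      List.append_nil, List.map_cons, List.map_nil]
    have : ∀ p : PySem.Dict String String, PySem.Dict.mk p.items = p := by
      intro p; cases p; rfl
    simp [this]
  | cons kv rest ih =>
    obtain ⟨k, vs⟩ := kv
    have hnd2 : ((k : String) :: rest.map Prod.fst).Nodup := by
      simpa only [List.map_cons] using hnd
    have hk : (k : String) ∉ rest.map Prod.fst := (List.nodup_cons.mp hnd2).1
    have hnd' : (rest.map Prod.fst).Nodup := (List.nodup_cons.mp hnd2).2
    simp only [List.foldl_cons]
    rw [ih (P.flatMap (fun p => vs.map (fun v => p.insert k v))) hnd' ?side]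
    case side =>
      intro q hq
      simp only [List.mem_flatMap, List.mem_map] at hq
      obtain ⟨p, hp, v, _, rfl⟩ := hq
      obtain ⟨hpnd, hpdis⟩ := hP p hp
      refine ⟨PySem.Dict.nodup_keys_insert _ _ _ hpnd, ?_⟩
      intro a ha
      have hak : (a == k) = false := by
        have : a ≠ k := fun h => hk (h ▸ ha)
        simpa using this
      rw [PySem.Dict.contains_insert, hak, hpdis a (by simp; right; simpa using ha)]
      rfl
    rw [List.flatMap_assoc]
    apply List.flatMap_congr
    intro p hp
    rw [List.flatMap_map]
    simp only [pyProductStr, List.map_cons, List.map_flatMap]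
    apply List.flatMap_congr
    intro v _
    rw [List.map_map]
    apply List.map_congr_left
    intro row _
    have hc : p.contains k = false := (hP p hp).2 k (by simp)
    simp only [Function.comp_apply, PySem.Dict.items_insert_of_not_contains p v hc,
      List.zip_cons_cons, List.append_assoc, List.cons_append,
      List.nil_append]

-- common normal form of both ports
theorem portA_eq (data : List (String × List String))
    (hnd : (data.map Prod.fst).Nodup) :
    premutate_single_tokents_py data
      = (pyProductStr (data.map Prod.snd)).map
          (fun row => [("tokens_values", (data.map Prod.fst).zip row)]) := by
  unfold premutate_single_tokents_py
  rw [PySem.List.foldl_append_eq_flatMap, List.nil_append]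
  have h1 : (PySem.List.enumerate (pyProductStr (data.map Prod.snd))).flatMap
      (fun irow => [[(("tokens_values" : String),
        ((PySem.List.enumerate (data.map Prod.fst)).foldl
          (fun (d : PySem.Dict String String) yk =>
            d.insert yk.2 ((PySem.List.pyGet? irow.2 yk.1).getD "")) PySem.Dict.empty).items)]])
      = (PySem.List.enumerate (pyProductStr (data.map Prod.snd))).map
      (fun irow => [(("tokens_values" : String), (data.map Prod.fst).zip irow.2)]) := by
    have hfm : ∀ {α β : Type} (l : List α) (f : α → β),
        l.flatMap (fun x => [f x]) = l.map f := by
      intro α β l f; induction l with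
      | nil => rfl
      | cons x xs ihl => simp [ihl]
    rw [hfm]
    apply List.map_congr_left
    intro irow hirow
    obtain ⟨kk, hkk, rfl⟩ := (PySem.List.mem_enumerate_iff _ _ _).mp hirow
    have hmem : (pyProductStr (data.map Prod.snd))[kk] ∈ pyProductStr (data.map Prod.snd) :=
      List.getElem_mem hkk
    rw [innerA_items _ _ (by simp [pyProductStr_length hmem]) hnd]
  rw [h1, ← PySem.List.map_snd_enumerate (pyProductStr (data.map Prod.snd)) 0, List.map_map]
  rw [PySem.List.map_snd_enumerate]
  rfl

-- ===== VERDICT (by name: the statement is the Claim_ definition above) =====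
theorem premutate_single_tokents_py_spec : Claim_equal_premutate_single_tokents_py := by
  intro data _ hpre
  unfold Spec_premutate_single_tokents_py
  rw [portA_eq data hpre]
  unfold premutate_single_tokents_py_alt
  rw [foldB_eq data [PySem.Dict.empty] hpre
    (by intro p hp; simp only [List.mem_singleton] at hp; subst hp
        exact ⟨by simp [PySem.Dict.keys, PySem.Dict.empty], fun a _ => by simp [PySem.Dict.contains_empty]⟩)]
  simp only [List.flatMap_singleton, List.map_map]
  apply List.map_congr_left
  intro row _
  rfl
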